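-- pv_equiv track=rewrite | github.com/goldenmean/python | duplicate_words_in_sentence.py | find_duplicate_words
-- ===== SOURCE A (Python) =====
-- def find_duplicate_words(s):
--     # Convert the string to lowercase and split into words
--     words = s.lower().split()
--
--     # Use a dictionary to count occurrences of each word
--     word_count = {}
--     for word in words:
--         word = word.strip(",.!?")  # Remove punctuation
--         if word in word_count:
--             word_count[word] += 1
--         else:
--             word_count[word] = 1
--
--     # Collect words that appear more than once
--     duplicates = [word for word, count in word_count.items() if count > 1]
--
--     return duplicates
-- ===== SOURCE B (Python) =====
-- def find_duplicate_words(s):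
--     words = [w.strip(",.!?") for w in s.lower().split()]
--     result = []
--     remaining = words
--     while remaining:
--         head = remaining[0]
--         rest = [x for x in remaining[1:] if x != head]
--         if len(remaining) - 1 > len(rest):
--             result.append(head)
--         remaining = rest
--     return result
-- ===== Notes on version B (the rewrite author's own statement) =====
-- stated objective: alternative
-- what changed: Replaces the counting dictionary plus items-filter with an iterative partition-elimination worklist: repeatedly take the first remaining word, filter out all its occurrences, and emit it if any occurrence was removed.
import Mathlib
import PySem

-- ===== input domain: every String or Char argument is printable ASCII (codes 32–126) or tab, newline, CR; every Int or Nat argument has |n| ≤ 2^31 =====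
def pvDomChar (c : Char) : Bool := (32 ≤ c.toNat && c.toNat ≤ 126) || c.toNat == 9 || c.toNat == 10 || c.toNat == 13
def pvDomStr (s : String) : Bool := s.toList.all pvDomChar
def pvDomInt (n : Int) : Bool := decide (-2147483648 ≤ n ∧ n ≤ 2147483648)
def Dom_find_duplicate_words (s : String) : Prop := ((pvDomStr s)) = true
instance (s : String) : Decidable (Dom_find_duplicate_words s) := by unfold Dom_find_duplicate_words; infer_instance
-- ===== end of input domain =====

-- ===== PORT A =====
-- B replaces A's counting dictionary + items-filter with a partition-elimination
-- worklist (take the first remaining word, drop all its occurrences, emit it if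
-- any were dropped).  Objective: alternative; no speed claim.
def find_duplicate_words (s : String) : List String :=
  let words := PySem.Str.split₀ (PySem.Str.lower s)
  let word_count := words.foldl (fun d word =>
    let w := PySem.Str.stripChars word ",.!?"
    if d.contains w then d.insert w (d.getD w 0 + 1) else d.insert w (1 : Int))
    PySem.Dict.empty
  (word_count.items.filter (fun wc => decide (1 < wc.2))).map Prod.fst

-- ===== PORT B =====
-- the while-loop of Source B: state (remaining, result)
def fdwGo (remaining : List String) (result : List String) : List String :=
  match remaining with
  | [] => result
  | head :: t =>
    let rest := t.filter (fun x => x != head)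
    fdwGo rest (if t.length > rest.length then result ++ [head] else result)
termination_by remaining.length
decreasing_by simpa using Nat.lt_succ_of_le (List.length_filter_le _ t)

def find_duplicate_words_alt (s : String) : List String :=
  let words := (PySem.Str.split₀ (PySem.Str.lower s)).map
    (fun w => PySem.Str.stripChars w ",.!?")
  fdwGo words []

-- ===== PRECONDITION & SPEC =====
def Spec_find_duplicate_words (s : String) (out : List String) : Prop := out = find_duplicate_words_alt s
instance (s : String) (out : List String) : Decidable (Spec_find_duplicate_words s out) := by unfold Spec_find_duplicate_words; infer_instance

-- ===== CLAIM (what is proved, stated in full; the proofs are below) =====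
def Claim_equal_find_duplicate_words : Prop := ∀ (s : String), Dom_find_duplicate_words s → Spec_find_duplicate_words s (find_duplicate_words s)

-- ===== LEMMAS AND PROOFS =====

-- first-occurrence dedup commutes with filter
theorem pv_ofList_filter (p : String → Bool) (t : List String) :
    PySem.Set.ofList (t.filter p) = (PySem.Set.ofList t).filter p := by
  induction t with
  | nil => rfl
  | cons x t ih =>
    by_cases hp : p x
    · rw [List.filter_cons_of_pos hp, PySem.Set.ofList_cons, PySem.Set.ofList_cons,
        List.filter_cons_of_pos hp, ih]
      simp [PySem.Set.discard, List.filter_filter, Bool.and_comm]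
    · rw [List.filter_cons_of_neg hp, PySem.Set.ofList_cons, List.filter_cons_of_neg hp, ih]
      have hpred : (fun a => p a && !(a == x)) = p := by
        funext y
        by_cases hy : y = x
        · subst hy; simp [hp]
        · simp [hy]
      simp [PySem.Set.discard, List.filter_filter, hpred]

-- peeling the head of a dedup as B's partition does
theorem pv_ofList_cons_filter (h : String) (t : List String) :
    PySem.Set.ofList (h :: t) = h :: PySem.Set.ofList (t.filter (fun x => x != h)) := by
  rw [PySem.Set.ofList_cons, pv_ofList_filter]
  simp [PySem.Set.discard, bne]

-- the worklist loop computes: result ++ the >1-count words of remaining, in first-occurrence order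
theorem pv_go (n : ℕ) : ∀ (remaining result : List String), remaining.length ≤ n →
    fdwGo remaining result
      = result ++ (PySem.Set.ofList remaining).filter (fun k => decide (1 < remaining.count k)) := by
  induction n with
  | zero =>
    intro remaining result hlen
    have : remaining = [] := List.eq_nil_of_length_eq_zero (Nat.le_zero.mp hlen)
    subst this
    simp [fdwGo]
  | succ n ih =>
    intro remaining result hlen
    match remaining with
    | [] => simp [fdwGo]
    | h :: t =>
      rw [fdwGo]
      have htn : t.length ≤ n := Nat.le_of_succ_le_succ hlen
      have hrest : (t.filter (fun x => x != h)).length ≤ n :=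
        le_trans (List.length_filter_le _ t) htn
      rw [ih _ _ hrest]
      rw [pv_ofList_cons_filter, List.filter_cons]
      have hcond : (decide (1 < (h :: t).count h) = true) ↔
          t.length > (t.filter (fun x => x != h)).length := by
        rw [List.count_cons_self]
        rw [show (t.length > (t.filter (fun x => x != h)).length) ↔ ∃ x ∈ t, ¬((x != h) = true)
          from List.length_filter_lt_length_iff_exists]
        simp [List.count_pos_iff]
      have hfc : (PySem.Set.ofList (t.filter (fun x => x != h))).filter
            (fun k => decide (1 < (h :: t).count k))
          = (PySem.Set.ofList (t.filter (fun x => x != h))).filter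
            (fun k => decide (1 < (t.filter (fun x => x != h)).count k)) := by
        apply List.filter_congr
        intro k hk
        have hk' : k ∈ t.filter (fun x => x != h) := (PySem.Set.mem_ofList _ _).mp hk
        have hne : (k != h) = true := (List.mem_filter.mp hk').2
        have h1 : List.count k (h :: t) = List.count k t :=
          List.count_cons_of_ne (fun he => (by simpa using hne : ¬k = h) he.symm)
        have h2 : List.count k (t.filter (fun x => x != h)) = List.count k t :=
          List.count_filter (p := fun x => x != h) hne
        rw [h1, h2]
      rw [hfc]
      by_cases hgt : t.length > (t.filter (fun x => x != h)).length
      · rw [if_pos hgt, if_pos (hcond.mpr hgt)]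
        simp
      · rw [if_neg hgt, if_neg (fun hc => hgt (hcond.mp hc))]

-- A's fold is the counter
theorem pv_countDict (ws : List String) :
    ws.foldl (fun d w => if d.contains w then d.insert w (d.getD w 0 + 1)
        else d.insert w (1 : Int)) PySem.Dict.empty
      = PySem.Dict.counter ws := by
  have hf : (fun (d : PySem.Dict String Int) w =>
      if d.contains w then d.insert w (d.getD w 0 + 1) else d.insert w (1 : Int))
      = fun d w => d.insert w (d.getD w 0 + 1) := by
    funext d w
    cases h : d.contains w with
    | true => simp
    | false => simp [PySem.Dict.getD_of_not_contains d 0 h]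
  rw [hf, PySem.Dict.foldl_insert_getD_add_one_eq_counter]

-- ===== VERDICT (by name: the statement is the Claim_ definition above) =====
theorem find_duplicate_words_spec : Claim_equal_find_duplicate_words := by
  intro s _
  unfold Spec_find_duplicate_words find_duplicate_words find_duplicate_words_alt
  simp only []
  set ws := (PySem.Str.split₀ (PySem.Str.lower s)).map
    (fun w => PySem.Str.stripChars w ",.!?") with hws
  rw [show (PySem.Str.split₀ (PySem.Str.lower s)).foldl
      (fun (d : PySem.Dict String Int) word =>
        if d.contains (PySem.Str.stripChars word ",.!?")
        then d.insert (PySem.Str.stripChars word ",.!?")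
          (d.getD (PySem.Str.stripChars word ",.!?") 0 + 1)
        else d.insert (PySem.Str.stripChars word ",.!?") (1 : Int))
      PySem.Dict.empty
    = ws.foldl (fun d w => if d.contains w then d.insert w (d.getD w 0 + 1)
        else d.insert w (1 : Int)) PySem.Dict.empty from (List.foldl_map
      (f := fun w => PySem.Str.stripChars w ",.!?")
      (g := fun (d : PySem.Dict String Int) w =>
        if d.contains w then d.insert w (d.getD w 0 + 1) else d.insert w (1 : Int))).symm]
  rw [pv_countDict, PySem.Dict.items_counter]
  rw [pv_go ws.length ws [] le_rfl]
  simp only [List.filter_map, List.map_map, Function.comp_def, List.nil_append]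
  rw [List.map_id']
  apply List.filter_congr
  intro k _
  simp [Nat.one_lt_cast]
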